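-- pv_equiv track=rewrite | github.com/TylerMclaughlin/the_turnip | enumerate_unique_chords.py | transpose_to_x_scale
-- ===== SOURCE A (Python) =====
-- def transpose_to_x_scale(chord, scale, z = 12):
--     '''
--     Specify a scale (not a class but a specific scale like D# Major, D# altered),
--     and a pitch class set will be transposed and returned as a subset of the specific scale.
--     If transposition cannot bring into the scale, returns ""
--     '''
--     chord = list(chord)
--     scale = list(scale)
--     for i in range(0,z):
--         transposed_chord = [(n + i)%z for n in chord]
--         if set(transposed_chord).issubset(set(scale)):
--             return sorted(transposed_chord)
--         # for rare case where chord is the scale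
--         if set(transposed_chord) == (set(scale)):
--             return sorted(transposed_chord)
--     # if none of these transpositions work,
--     # return empty chord
--     return []
-- ===== SOURCE B (Python) =====
-- def transpose_to_x_scale(chord, scale, z = 12):
--     # Derive the set of valid transposition offsets directly instead of trial-testing each shift:
--     # note n can land on canonical scale note s exactly under the offset (s - n) % z.
--     if not chord:
--         return []
--     canon = {s for s in scale if 0 <= s < z}
--     first, *rest = chord
--     allowed = {(s - first) % z for s in canon}
--     for n in rest:
--         allowed &= {(s - n) % z for s in canon}
--     if not allowed:
--         return []
--     i = min(allowed)
--     return sorted((n + i) % z for n in chord)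
-- ===== Notes on version B (the rewrite author's own statement) =====
-- stated objective: alternative
-- what changed: Instead of trial-testing every shift i in range(z) with a subset check, B computes the set of valid transposition offsets directly by intersecting, over the chord notes, the offsets (s-n)%z reaching a canonical scale note, then takes the minimum offset.
import Mathlib
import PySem

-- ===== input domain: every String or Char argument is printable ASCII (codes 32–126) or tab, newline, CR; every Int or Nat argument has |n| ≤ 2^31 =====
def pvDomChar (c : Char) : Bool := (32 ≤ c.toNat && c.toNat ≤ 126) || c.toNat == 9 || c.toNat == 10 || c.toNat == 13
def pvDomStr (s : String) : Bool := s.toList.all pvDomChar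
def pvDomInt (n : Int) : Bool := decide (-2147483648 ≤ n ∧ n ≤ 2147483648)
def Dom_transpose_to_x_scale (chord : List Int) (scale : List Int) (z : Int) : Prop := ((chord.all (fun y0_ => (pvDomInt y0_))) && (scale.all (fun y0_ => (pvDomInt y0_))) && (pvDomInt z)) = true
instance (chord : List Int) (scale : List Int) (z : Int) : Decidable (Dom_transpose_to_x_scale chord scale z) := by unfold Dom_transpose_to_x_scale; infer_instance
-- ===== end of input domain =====

-- B replaces A's trial loop over all z shifts by intersecting, per chord note, the set of offsets reaching a canonical scale note; alternative decomposition, no asymptotic claim.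

-- ===== PORT A =====
-- the 'for i in range(0, z)' loop with its two early returns
def tA_loop (chord : List Int) (scale : List Int) (z : Int) : List Int → List Int
  | [] => []
  | i :: rest =>
    let transposed_chord := chord.map (fun n => PySem.Int.mod (n + i) z)
    if PySem.Set.issubset (PySem.Set.ofList transposed_chord) (PySem.Set.ofList scale) then
      PySem.List.sorted transposed_chord (fun x => x) false
    else if PySem.Set.equal (PySem.Set.ofList transposed_chord) (PySem.Set.ofList scale) then
      PySem.List.sorted transposed_chord (fun x => x) false
    else tA_loop chord scale z rest

def transpose_to_x_scale (chord : List Int) (scale : List Int) (z : Int) : List Int :=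
  tA_loop chord scale z (PySem.List.pyRange 0 z 1)

-- ===== PORT B =====
def transpose_to_x_scale_alt (chord : List Int) (scale : List Int) (z : Int) : List Int :=
  match chord with
  | [] => []
  | first :: rest =>
    let canon : PySem.Set Int := PySem.Set.ofList (scale.filter (fun s => decide (0 ≤ s ∧ s < z)))
    let allowed : PySem.Set Int :=
      rest.foldl
        (fun acc n => PySem.Set.inter acc (PySem.Set.ofList (canon.map (fun s => PySem.Int.mod (s - n) z))))
        (PySem.Set.ofList (canon.map (fun s => PySem.Int.mod (s - first) z)))
    match PySem.List.min? allowed (fun x => x) with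
    | some i => PySem.List.sorted (chord.map (fun n => PySem.Int.mod (n + i) z)) (fun x => x) false
    | none => []

-- ===== PRECONDITION & SPEC =====
def Spec_transpose_to_x_scale (chord : List Int) (scale : List Int) (z : Int) (out : List Int) : Prop := out = transpose_to_x_scale_alt chord scale z
instance (chord : List Int) (scale : List Int) (z : Int) (out : List Int) : Decidable (Spec_transpose_to_x_scale chord scale z out) := by unfold Spec_transpose_to_x_scale; infer_instance

-- ===== CLAIM (what is proved, stated in full; the proofs are below) =====
def Claim_equal_transpose_to_x_scale : Prop := ∀ (chord : List Int) (scale : List Int) (z : Int), Dom_transpose_to_x_scale chord scale z → Spec_transpose_to_x_scale chord scale z (transpose_to_x_scale chord scale z)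

-- ===== LEMMAS AND PROOFS =====

-- A's first-hit predicate: transposed chord is (as a set) contained in the scale
def pA (chord : List Int) (scale : List Int) (z : Int) (i : Int) : Bool :=
  PySem.Set.issubset (PySem.Set.ofList (chord.map (fun n => PySem.Int.mod (n + i) z))) (PySem.Set.ofList scale)

-- B's candidate-offset set for one chord note
def gB (scale : List Int) (z : Int) (n : Int) : PySem.Set Int :=
  PySem.Set.ofList ((PySem.Set.ofList (scale.filter (fun s => decide (0 ≤ s ∧ s < z)))).map
    (fun s => PySem.Int.mod (s - n) z))

-- A's loop is "sorted transposed chord at the first i satisfying pA, else []"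
lemma tA_loop_eq_find (chord scale : List Int) (z : Int) :
    ∀ l : List Int, tA_loop chord scale z l =
      match l.find? (pA chord scale z) with
      | some i => PySem.List.sorted (chord.map (fun n => PySem.Int.mod (n + i) z)) (fun x => x) false
      | none => [] := by
  intro l
  induction l with
  | nil => rfl
  | cons a rest ih =>
    rw [List.find?_cons]
    by_cases h : pA chord scale z a
    · have hsub : PySem.Set.issubset
          (PySem.Set.ofList (chord.map (fun n => PySem.Int.mod (n + a) z)))
          (PySem.Set.ofList scale) = true := h
      simp [tA_loop, hsub, h]
    · have hpa : pA chord scale z a = false := by simpa using h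
      have hsub : PySem.Set.issubset
          (PySem.Set.ofList (chord.map (fun n => PySem.Int.mod (n + a) z)))
          (PySem.Set.ofList scale) = false := hpa
      -- set equality implies the subset already tested; the second branch never fires
      have hne : PySem.Set.equal
          (PySem.Set.ofList (chord.map (fun n => PySem.Int.mod (n + a) z)))
          (PySem.Set.ofList scale) = false := by
        simp [PySem.Set.equal, hsub]
      simp [tA_loop, hsub, hne, hpa, ih]

-- B's chord fold is a single filter by the conjunction of the per-note conditions
lemma foldl_inter_eq_filter (g : Int → PySem.Set Int) :
    ∀ (rest : List Int) (init : List Int),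
      rest.foldl (fun acc n => PySem.Set.inter acc (g n)) init
        = init.filter (fun i => rest.all (fun n => (g n).contains i)) := by
  intro rest
  induction rest with
  | nil => intro init; simp
  | cons a t ih =>
    intro init
    rw [List.foldl_cons, ih]
    simp only [PySem.Set.inter, List.filter_filter]
    apply List.filter_congr
    intro x hx
    simp [List.all_cons, Bool.and_comm]

-- the offset/membership correspondence: for 0 ≤ i < z, (n+i) % z hits s ∈ [0,z) iff i = (s-n) % z
lemma key_mod (z i n s : Int) (hi0 : 0 ≤ i) (hiz : i < z) (hs0 : 0 ≤ s) (hsz : s < z) :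
    i = PySem.Int.mod (s - n) z ↔ PySem.Int.mod (n + i) z = s := by
  have hz : (0:Int) < z := lt_of_le_of_lt hi0 hiz
  rw [PySem.Int.mod_eq_emod_of_pos hz, PySem.Int.mod_eq_emod_of_pos hz]
  constructor
  · intro h
    subst h
    rw [Int.add_emod n ((s - n) % z), Int.emod_emod_of_dvd _ dvd_rfl, ← Int.add_emod]
    have : n + (s - n) = s := by ring
    rw [this, Int.emod_eq_of_lt hs0 hsz]
  · intro h
    rw [← h, Int.sub_emod ((n + i) % z) n, Int.emod_emod_of_dvd _ dvd_rfl, ← Int.sub_emod]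
    have : n + i - n = i := by ring
    rw [this, Int.emod_eq_of_lt hi0 hiz]

-- any member of a candidate-offset set lies in [0, z)
lemma mem_gB_bounds (scale : List Int) (z n x : Int) (hx : x ∈ gB scale z n) : 0 ≤ x ∧ x < z := by
  simp only [gB, PySem.Set.mem_ofList, List.mem_map, List.mem_filter, decide_eq_true_eq] at hx
  obtain ⟨s, ⟨_, hs0, hsz⟩, rfl⟩ := hx
  have hz : (0:Int) < z := lt_of_le_of_lt hs0 hsz
  exact ⟨PySem.Int.mod_nonneg _ hz, PySem.Int.mod_lt _ hz⟩

-- pointwise: in range(z), A's subset test is the conjunction of B's offset-membership tests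
lemma pred_agree (chord scale : List Int) (z i : Int) (hi0 : 0 ≤ i) (hiz : i < z) :
    pA chord scale z i = chord.all (fun n => (gB scale z n).contains i) := by
  have hz : (0:Int) < z := lt_of_le_of_lt hi0 hiz
  simp only [pA, gB, PySem.Set.issubset, PySem.Set.contains]
  rw [Bool.eq_iff_iff]
  simp only [List.all_eq_true, List.contains_iff_mem, PySem.Set.mem_ofList, List.mem_map,
    List.mem_filter, decide_eq_true_eq]
  constructor
  · intro h n hn
    have := h (PySem.Int.mod (n + i) z) ⟨n, hn, rfl⟩
    refine ⟨PySem.Int.mod (n + i) z, ⟨this, ?_, ?_⟩, ?_⟩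
    · exact PySem.Int.mod_nonneg _ hz
    · exact PySem.Int.mod_lt _ hz
    · exact ((key_mod z i n _ hi0 hiz (PySem.Int.mod_nonneg _ hz) (PySem.Int.mod_lt _ hz)).mpr rfl).symm
  · rintro h x ⟨n, hn, rfl⟩
    obtain ⟨s, ⟨hs, hs0, hsz⟩, hieq⟩ := h n hn
    have := (key_mod z i n s hi0 hiz hs0 hsz).mp hieq.symm
    rwa [this]

-- the filtered range and B's intersected offset set have the same members (chord = first :: rest)
lemma mem_allowed_iff (first : Int) (rest scale : List Int) (z x : Int) :
    x ∈ ((gB scale z first : List Int).filter (fun i => rest.all (fun n => (gB scale z n).contains i)))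
      ↔ x ∈ (PySem.List.pyRange 0 z 1).filter (pA (first :: rest) scale z) := by
  simp only [List.mem_filter, PySem.List.mem_pyRange_one]
  constructor
  · rintro ⟨hxg, hall⟩
    obtain ⟨hx0, hxz⟩ := mem_gB_bounds scale z first x hxg
    refine ⟨⟨hx0, hxz⟩, ?_⟩
    rw [pred_agree _ _ _ _ hx0 hxz]
    simp only [List.all_cons, Bool.and_eq_true]
    exact ⟨by simpa [PySem.Set.contains, List.contains_iff_mem] using hxg, hall⟩
  · rintro ⟨⟨hx0, hxz⟩, hp⟩
    rw [pred_agree _ _ _ _ hx0 hxz] at hp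
    simp only [List.all_cons, Bool.and_eq_true] at hp
    exact ⟨by simpa [PySem.Set.contains, List.contains_iff_mem] using hp.1, hp.2⟩

-- B's cons-case, with the fold rewritten as a single filter
lemma alt_cons (first : Int) (rest scale : List Int) (z : Int) :
    transpose_to_x_scale_alt (first :: rest) scale z =
      match PySem.List.min? ((gB scale z first : List Int).filter
          (fun i => rest.all (fun n => (gB scale z n).contains i))) (fun x => x) with
      | some i => PySem.List.sorted ((first :: rest).map (fun n => PySem.Int.mod (n + i) z)) (fun x => x) false
      | none => [] := by
  show (match PySem.List.min? (rest.foldl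
      (fun acc n => PySem.Set.inter acc (gB scale z n)) (gB scale z first)) (fun x => x) with
    | some i => PySem.List.sorted ((first :: rest).map (fun n => PySem.Int.mod (n + i) z)) (fun x => x) false
    | none => []) = _
  rw [foldl_inter_eq_filter]

-- ===== VERDICT (by name: the statement is the Claim_ definition above) =====
theorem transpose_to_x_scale_spec : Claim_equal_transpose_to_x_scale := by
  intro chord scale z _
  unfold Spec_transpose_to_x_scale
  show transpose_to_x_scale chord scale z = transpose_to_x_scale_alt chord scale z
  unfold transpose_to_x_scale
  rw [tA_loop_eq_find, ← List.head?_filter]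
  cases chord with
  | nil =>
    -- empty chord: A hits i = 0 at once (if z > 0) and returns sorted [] = []
    show _ = ([] : List Int)
    by_cases hz : 0 < z
    · rw [PySem.List.pyRange_one_cons hz]
      have hp : pA [] scale z 0 = true := rfl
      simp [hp, PySem.List.sorted_eq_nil_iff]
    · rw [PySem.List.pyRange_one_eq_nil (by omega)]
      rfl
  | cons first rest =>
    rw [alt_cons]
    have hmem := mem_allowed_iff first rest scale z
    -- the filtered range is sorted strictly increasingly; its head is the least valid offset
    cases hh : ((PySem.List.pyRange 0 z 1).filter (pA (first :: rest) scale z)) with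
    | nil =>
      have : ((gB scale z first : List Int).filter
          (fun i => rest.all (fun n => (gB scale z n).contains i))) = [] := by
        apply List.eq_nil_iff_forall_not_mem.mpr
        intro x hx
        exact (List.not_mem_nil) ((hh ▸ (hmem x).mp) hx)
      rw [this]
      rfl
    | cons h0 t =>
      have hpair : ((PySem.List.pyRange 0 z 1).filter (pA (first :: rest) scale z)).Pairwise (· < ·) :=
        (PySem.List.pairwise_lt_pyRange_one 0 z).filter _
      rw [hh] at hpair
      have hh0le : ∀ y ∈ h0 :: t, h0 ≤ y := by
        intro y hy
        rcases List.mem_cons.mp hy with rfl | hy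
        · exact le_refl _
        · exact le_of_lt ((List.pairwise_cons.mp hpair).1 y hy)
      have hh0mem : h0 ∈ ((gB scale z first : List Int).filter
          (fun i => rest.all (fun n => (gB scale z n).contains i))) :=
        (hmem h0).mpr (hh ▸ List.mem_cons_self)
      cases hmin : PySem.List.min? ((gB scale z first : List Int).filter
          (fun i => rest.all (fun n => (gB scale z n).contains i))) (fun x => x) with
      | none =>
        rw [PySem.List.min?_eq_none_iff] at hmin
        exact absurd (hmin ▸ hh0mem) List.not_mem_nil
      | some m =>
        have hm_mem : m ∈ h0 :: t := hh ▸ (hmem m).mp (PySem.List.min?_mem hmin)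
        have h1 : h0 ≤ m := hh0le m hm_mem
        have h2 : m ≤ h0 := PySem.List.min?_isMin hmin h0 hh0mem
        have : m = h0 := le_antisymm h2 h1
        subst this
        rfl
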